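-- pv_equiv track=rewrite | github.com/ppijbb/LLMPostTraining | scripts/read_file.py | _normalize_prefix
-- ===== SOURCE A (Python) =====
-- SUMMARY_COLUMNS = [
--     "soap_assessment",
--     "soap_object",
--     "soap_plan",
--     "soap_report",
--     "soap_subject",
--     "summary",
--     "intents",
--     "report",
--     "treatment",
--     "cost_estimation",
-- ]
--
-- FORMAT_SUFFIXES = ("_txt", "_table")
--
-- def _normalize_prefix(prefix: str) -> tuple[str | None, str]:
--     """
--     파일명 prefix에서 (summary_type, format_suffix) 추출.
--     예: 'soap_assessment_txt' → ('soap_assessment', 'txt')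
--         'soap_assessment_table' → ('soap_assessment', 'table')
--         'soap_assessment' → ('soap_assessment', '')
--     """
--     for suf in FORMAT_SUFFIXES:
--         if prefix.endswith(suf):
--             stype = prefix[: -len(suf)]
--             if stype in SUMMARY_COLUMNS:
--                 return stype, suf.lstrip("_")  # 'txt', 'table'
--             return None, ""
--     if prefix in SUMMARY_COLUMNS:
--         return prefix, ""
--     return None, ""
-- ===== SOURCE B (Python) =====
-- SUMMARY_COLUMNS = [
--     "soap_assessment",
--     "soap_object",
--     "soap_plan",
--     "soap_report",
--     "soap_subject",
--     "summary",
--     "intents",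
--     "report",
--     "treatment",
--     "cost_estimation",
-- ]
--
-- # Precomputed table: every valid full prefix -> its (summary_type, format) pair.
-- _TABLE = {}
-- for _c in SUMMARY_COLUMNS:
--     _TABLE[_c] = (_c, "")
--     _TABLE[_c + "_txt"] = (_c, "txt")
--     _TABLE[_c + "_table"] = (_c, "table")
--
-- def _normalize_prefix(prefix: str) -> tuple[str | None, str]:
--     return _TABLE.get(prefix, (None, ""))
-- ===== Notes on version B (the rewrite author's own statement) =====
-- stated objective: simpler
-- what changed: The endswith-loop with slicing and a list-membership test is replaced by one precomputed dict mapping every valid full prefix (column, column+'_txt', column+'_table') to its output pair, so the whole body is a single _TABLE.get(prefix, (None, '')).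
import Mathlib
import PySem

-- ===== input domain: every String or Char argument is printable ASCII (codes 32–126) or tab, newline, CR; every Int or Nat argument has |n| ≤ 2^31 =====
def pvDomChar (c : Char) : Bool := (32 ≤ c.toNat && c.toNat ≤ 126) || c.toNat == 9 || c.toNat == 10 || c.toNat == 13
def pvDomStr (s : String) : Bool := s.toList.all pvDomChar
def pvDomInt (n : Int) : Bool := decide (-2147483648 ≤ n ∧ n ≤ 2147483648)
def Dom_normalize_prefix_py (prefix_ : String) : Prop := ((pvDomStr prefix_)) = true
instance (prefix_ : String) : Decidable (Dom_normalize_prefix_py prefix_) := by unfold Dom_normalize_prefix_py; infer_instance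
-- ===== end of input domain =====

-- B replaces A's endswith-loop + slice + list-membership test by one precomputed
-- lookup table mapping every valid full prefix to its output pair (objective: simpler).


-- ===== PORT A =====
def pvCols : List String :=
  ["soap_assessment", "soap_object", "soap_plan", "soap_report", "soap_subject",
   "summary", "intents", "report", "treatment", "cost_estimation"]

def pvSufs : List String := ["_txt", "_table"]

-- hand port of Python's suf.lstrip("_") (exact: the strip-character set is just {'_'})
def pvLstripUnderscore (s : String) : String :=
  String.ofList (s.toList.dropWhile (fun c => c == '_'))

-- the 'for suf in FORMAT_SUFFIXES' loop with its early returns; [] = loop fell through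
def pvLoopA (prefix_ : String) : List String → Option String × String
  | [] => if prefix_ ∈ pvCols then (some prefix_, "") else (none, "")
  | suf :: rest =>
    if PySem.Str.endswith prefix_ suf = true then
      let stype := PySem.Str.slice prefix_ none (some (-(PySem.Str.len suf : Int)))
      if stype ∈ pvCols then (some stype, pvLstripUnderscore suf) else (none, "")
    else pvLoopA prefix_ rest

def normalize_prefix_py (prefix_ : String) : Option String × String :=
  pvLoopA prefix_ pvSufs

-- ===== PORT B =====
-- the module-level 'for _c in SUMMARY_COLUMNS: _TABLE[...] = ...' build loop
def pvTable : PySem.Dict String (Option String × String) :=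
  pvCols.foldl
    (fun d c =>
      ((d.insert c (some c, "")).insert (c ++ "_txt") (some c, "txt")).insert
        (c ++ "_table") (some c, "table"))
    PySem.Dict.empty

def normalize_prefix_py_alt (prefix_ : String) : Option String × String :=
  pvTable.getD prefix_ (none, "")

-- ===== PRECONDITION & SPEC =====
def Spec_normalize_prefix_py (prefix_ : String) (out : Option String × String) : Prop := out = normalize_prefix_py_alt prefix_
instance (prefix_ : String) (out : Option String × String) : Decidable (Spec_normalize_prefix_py prefix_ out) := by unfold Spec_normalize_prefix_py; infer_instance

-- ===== CLAIM (what is proved, stated in full; the proofs are below) =====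
def Claim_equal_normalize_prefix_py : Prop := ∀ (prefix_ : String), Dom_normalize_prefix_py prefix_ → Spec_normalize_prefix_py prefix_ (normalize_prefix_py prefix_)

-- ===== LEMMAS AND PROOFS =====

-- the 30 keys of B's table, in insertion order
def pvKeys : List String :=
  ["soap_assessment", "soap_assessment_txt", "soap_assessment_table",
   "soap_object", "soap_object_txt", "soap_object_table",
   "soap_plan", "soap_plan_txt", "soap_plan_table",
   "soap_report", "soap_report_txt", "soap_report_table",
   "soap_subject", "soap_subject_txt", "soap_subject_table",
   "summary", "summary_txt", "summary_table",
   "intents", "intents_txt", "intents_table",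
   "report", "report_txt", "report_table",
   "treatment", "treatment_txt", "treatment_table",
   "cost_estimation", "cost_estimation_txt", "cost_estimation_table"]

lemma pvTable_keys : pvTable.keys = pvKeys := by decide

-- prefix[:-len(sfx)] recovers the head of p when sfx is a (nonempty) suffix of p
lemma pv_slice_decomp (p sfx : String) (u : List Char) (hpos : 0 < sfx.toList.length)
    (hu : u ++ sfx.toList = p.toList) :
    (PySem.Str.slice p none (some (-(PySem.Str.len sfx : Int)))).toList = u := by
  have hlen : (PySem.Str.len sfx : Int) = ((sfx.toList.length : Nat) : Int) := by
    simp [PySem.Str.len_eq]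
  have hl : p.toList.length = u.length + sfx.toList.length := by
    have := congrArg List.length hu
    simpa using this.symm
  rw [hlen, PySem.Str.toList_slice, PySem.Chars.slice_eq_listSlice,
    PySem.List.slice_to_neg_natCast p.toList _ hpos, hl, ← hu]
  simp

-- if p ends in sfx and the sliced head is a column c, then p is the key c ++ sfx
lemma pv_eq_key (p sfx c : String) (hpos : 0 < sfx.toList.length)
    (hend : PySem.Str.endswith p sfx = true)
    (hc : PySem.Str.slice p none (some (-(PySem.Str.len sfx : Int))) = c) :
    p = c ++ sfx := by
  have hsuf : sfx.toList <:+ p.toList := by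
    simpa [pysem] using hend
  obtain ⟨u, hu⟩ := hsuf
  have hslice := pv_slice_decomp p sfx u hpos hu
  rw [hc] at hslice
  apply String.toList_inj.mp
  rw [← hu, ← hslice]
  simp

-- outside the 30 table keys, A's loop falls all the way through to (none, "")
lemma pvA_not_key (p : String) (hk : p ∉ pvKeys) : normalize_prefix_py p = (none, "") := by
  have hmem : ∀ sfx c : String, 0 < sfx.toList.length →
      PySem.Str.endswith p sfx = true →
      PySem.Str.slice p none (some (-(PySem.Str.len sfx : Int))) = c →
      (c ++ sfx) ∈ pvKeys → False := by
    intro sfx c hpos hend hc hkey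
    exact hk ((pv_eq_key p sfx c hpos hend hc) ▸ hkey)
  show pvLoopA p pvSufs = (none, "")
  rw [pvSufs]
  rw [pvLoopA]
  by_cases h1 : PySem.Str.endswith p "_txt" = true
  · rw [if_pos h1]
    by_cases ht : PySem.Str.slice p none (some (-(PySem.Str.len "_txt" : Int))) ∈ pvCols
    · exfalso
      generalize hc : PySem.Str.slice p none (some (-(PySem.Str.len "_txt" : Int))) = c at ht
      fin_cases ht <;> exact hmem "_txt" _ (by decide) h1 hc (by decide)
    · exact if_neg ht
  · rw [if_neg h1, pvLoopA]
    by_cases h2 : PySem.Str.endswith p "_table" = true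
    · rw [if_pos h2]
      by_cases ht : PySem.Str.slice p none (some (-(PySem.Str.len "_table" : Int))) ∈ pvCols
      · exfalso
        generalize hc : PySem.Str.slice p none (some (-(PySem.Str.len "_table" : Int))) = c at ht
        fin_cases ht <;> exact hmem "_table" _ (by decide) h2 hc (by decide)
      · exact if_neg ht
    · rw [if_neg h2, pvLoopA]
      have hp : p ∉ pvCols := fun h => by fin_cases h <;> exact hk (by decide)
      simp [hp]

lemma pvB_not_key (p : String) (hk : p ∉ pvKeys) :
    normalize_prefix_py_alt p = (none, "") := by
  show pvTable.getD p (none, "") = (none, "")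
  apply PySem.Dict.getD_of_not_contains
  have hiff := PySem.Dict.contains_iff_mem_keys (d := pvTable) (k := p)
  rw [pvTable_keys] at hiff
  cases hcp : pvTable.contains p with
  | false => rfl
  | true => exact absurd (hiff.mp hcp) hk

-- ===== VERDICT (by name: the statement is the Claim_ definition above) =====
theorem normalize_prefix_py_spec : Claim_equal_normalize_prefix_py := by
  intro p _
  unfold Spec_normalize_prefix_py
  by_cases hk : p ∈ pvKeys
  · fin_cases hk <;> decide
  · rw [pvA_not_key p hk, pvB_not_key p hk]
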